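-- pv_equiv track=rewrite | github.com/aastrand/aoc2019 | 4/solve.py | meets_critera
-- ===== SOURCE A (Python) =====
-- def meets_critera(n):
--     str = "%d" % n
--
--     if len(str) != 6:
--         return False
--
--     digit_map = {}
--     last_digit = -1
--
--     for digit in str:
--         id = int(digit)
--         if id < last_digit:
--             return False
--         if last_digit == id:
--             count = digit_map.get(id, 1)
--             digit_map[id] = count + 1
--         last_digit = id
--
--     for value in digit_map.values():
--         if value == 2:
--             return True
--
--     return False
-- ===== SOURCE B (Python) =====
-- def meets_critera(n):
--     s = "%d" % n
--     if len(s) != 6: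
--         return False
--     digits = [int(c) for c in s]
--     if digits != sorted(digits):
--         return False
--     return any(digits.count(d) == 2 for d in digits)
-- ===== Notes on version B (the rewrite author's own statement) =====
-- stated objective: simpler
-- what changed: A's single stateful pass (manual last-digit monotonicity tracking plus a dict of run counts scanned afterwards) is replaced by a digit-list decomposition: compare the digit list with its sorted copy for monotonicity, then detect an exactly-double digit with a count-based any().
-- outside the precondition, e.g. on meets_critera(-99999): A raises ValueError, B raises ValueError; on meets_critera(-10000): A raises ValueError, B raises ValueError
import Mathlib
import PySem

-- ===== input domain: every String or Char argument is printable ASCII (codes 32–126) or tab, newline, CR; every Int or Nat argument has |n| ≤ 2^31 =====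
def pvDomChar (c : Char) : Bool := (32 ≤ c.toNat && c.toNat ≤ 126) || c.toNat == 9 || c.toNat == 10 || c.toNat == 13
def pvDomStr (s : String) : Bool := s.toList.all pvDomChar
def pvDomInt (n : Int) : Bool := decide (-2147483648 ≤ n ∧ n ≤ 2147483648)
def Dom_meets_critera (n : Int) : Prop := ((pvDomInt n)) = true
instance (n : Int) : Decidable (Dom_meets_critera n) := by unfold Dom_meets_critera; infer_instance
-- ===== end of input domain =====

-- B replaces A's stateful single pass (manual monotonicity tracking plus a dict of run counts)
-- by a whole-list comparison with its sorted copy plus a count-based pair test: simpler decomposition.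


-- ===== PORT A =====
-- int(c) for a single character c; `.getD 0` is unreachable under Pre_meets_critera
-- (int('-') raises ValueError only on the excluded negative six-character inputs).
def pvConv (c : Char) : Int := (PySem.Int.ofChars? [c]).getD 0

-- the `for digit in str` loop of A; `none` = the early `return False` on a decrease
def meetsLoopA (chars : List Char) (digit_map : PySem.Dict Int Int) (last_digit : Int) :
    Option (PySem.Dict Int Int) :=
  match chars with
  | [] => some digit_map
  | c :: rest =>
    let id := pvConv c
    if id < last_digit then none
    else
      meetsLoopA rest
        (if last_digit == id then digit_map.insert id (digit_map.getD id 1 + 1) else digit_map)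
        id

def meets_critera (n : Int) : Bool :=
  let s := PySem.Int.toChars n
  if s.length ≠ 6 then false
  else
    match meetsLoopA s PySem.Dict.empty (-1) with
    | none => false
    | some digit_map => (PySem.Dict.values digit_map).any (fun v => v == 2)

-- ===== PORT B =====
def meets_critera_alt (n : Int) : Bool :=
  let s := PySem.Int.toChars n
  if s.length ≠ 6 then false
  else
    let digits := s.map pvConv
    if digits ≠ PySem.List.sorted digits (fun x => x) then false
    else digits.any (fun d => PySem.List.count digits d == 2)

-- ===== PRECONDITION & SPEC =====
-- Pre_ excludes exactly the negative six-character inputs -99999 ≤ n ≤ -10000, on which the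
-- Python A raises ValueError (int('-')); A returns normally everywhere else (and B raises there too).
def Pre_meets_critera (n : Int) : Prop := ¬(-99999 ≤ n ∧ n ≤ -10000)
instance (n : Int) : Decidable (Pre_meets_critera n) := by unfold Pre_meets_critera; infer_instance

def pvWitness_meets_critera : Int := (123345)

def Spec_meets_critera (n : Int) (out : Bool) : Prop := out = meets_critera_alt n
instance (n : Int) (out : Bool) : Decidable (Spec_meets_critera n out) := by unfold Spec_meets_critera; infer_instance

-- ===== CLAIM (what is proved, stated in full; the proofs are below) =====
def Claim_equal_meets_critera : Prop := ∀ (n : Int), Dom_meets_critera n → Pre_meets_critera n → Spec_meets_critera n (meets_critera n)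

-- ===== LEMMAS AND PROOFS =====

-- proof-side twin of meetsLoopA over the converted digit values
def loopInts (ds : List Int) (m : PySem.Dict Int Int) (last : Int) : Option (PySem.Dict Int Int) :=
  match ds with
  | [] => some m
  | d :: rest =>
    if d < last then none
    else loopInts rest (if last == d then m.insert d (m.getD d 1 + 1) else m) d

theorem meetsLoopA_eq_loopInts (chars : List Char) :
    ∀ (m : PySem.Dict Int Int) (last : Int),
    meetsLoopA chars m last = loopInts (chars.map pvConv) m last := by
  induction chars with
  | nil => intro m last; rfl
  | cons c rest ih =>
      intro m last
      simp only [meetsLoopA, loopInts, List.map_cons]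
      split_ifs <;> first | rfl | exact ih _ _

theorem pvOptNonneg (o : Option Nat) :
    0 ≤ ((Option.map (fun n : Int => n) (do let a ← o; pure ((a : Int)))).getD 0) := by
  cases o <;> simp

theorem pvConv_nonneg (c : Char) : 0 ≤ pvConv c := by
  unfold pvConv
  by_cases hm : c = '-'
  · subst hm; decide
  by_cases hp : c = '+'
  · subst hp; decide
  unfold PySem.Int.ofChars?
  by_cases hs : PySem.Int.isIntSpace c
  · simp only [List.dropWhile, hs, List.reverse_nil]
    exact pvOptNonneg _
  · simp only [List.dropWhile, hs, List.reverse_cons, List.reverse_nil, List.nil_append]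
    split
    · next ds heq => simp_all
    · next ds heq => simp_all
    · exact pvOptNonneg _

theorem loopInts_none (ds : List Int) :
    ∀ (m : PySem.Dict Int Int) (last : Int),
    ¬ List.Pairwise (· ≤ ·) (last :: ds) → loopInts ds m last = none := by
  induction ds with
  | nil => intro m last h; exact absurd (List.pairwise_singleton _ _) h
  | cons d rest ih =>
      intro m last h
      simp only [loopInts]
      split_ifs with hlt heq
      · rfl
      all_goals {
        apply ih
        intro hpp
        apply h
        refine List.Pairwise.cons ?_ hpp
        intro x hx
        rcases List.mem_cons.mp hx with rfl | hx
        · omega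
        · exact le_trans (by omega) (List.rel_of_pairwise_cons hpp hx) }

theorem loopInts_nodup (ds : List Int) :
    ∀ (m : PySem.Dict Int Int) (last : Int) (m' : PySem.Dict Int Int),
    loopInts ds m last = some m' → m.keys.Nodup → m'.keys.Nodup := by
  induction ds with
  | nil => intro m last m' h hnd; cases h; exact hnd
  | cons d rest ih =>
      intro m last m' h hnd
      simp only [loopInts] at h
      by_cases hlt : d < last
      · rw [if_pos hlt] at h; cases h
      · rw [if_neg hlt] at h
        by_cases heq : (last == d) = true
        · rw [if_pos heq] at h
          exact ih _ _ _ h (PySem.Dict.nodup_keys_insert _ _ _ hnd)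
        · rw [if_neg heq] at h
          exact ih _ _ _ h hnd

-- the heart of the equivalence: on a non-decreasing suffix, the final dict holds, for each
-- digit, exactly its multiplicity (when ≥ 2, or continued from `last` via the stored count)
theorem loopInts_char (ds : List Int) :
    ∀ (m : PySem.Dict Int Int) (last : Int),
    List.Pairwise (· ≤ ·) (last :: ds) →
    (∀ d : Int, last < d → m.get? d = none) →
    ∃ m', loopInts ds m last = some m' ∧
      ∀ d : Int, m'.get? d =
        if d = last ∧ 1 ≤ List.count d ds then some (m.getD d 1 + (List.count d ds : Int))
        else if 2 ≤ List.count d ds then some ((List.count d ds : Int))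
        else m.get? d := by
  induction ds with
  | nil =>
      intro m last _ _
      refine ⟨m, rfl, fun d => ?_⟩
      simp
  | cons d0 rest ih =>
      intro m last hp hfresh
      have hld : last ≤ d0 := List.rel_of_pairwise_cons hp List.mem_cons_self
      have hpt : List.Pairwise (· ≤ ·) (d0 :: rest) := List.Pairwise.sublist (by simp) hp
      have hrest_ge : ∀ x ∈ rest, d0 ≤ x := fun x hx => List.rel_of_pairwise_cons hpt hx
      simp only [loopInts, if_neg (not_lt.mpr hld)]
      by_cases heq : last = d0
      · -- run continues
        subst heq
        simp only [beq_self_eq_true, if_pos]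
        have hfresh' : ∀ d : Int, last < d →
            (m.insert last (m.getD last 1 + 1)).get? d = none := by
          intro d hd
          rw [PySem.Dict.get?_insert, if_neg (by omega)]
          exact hfresh d hd
        obtain ⟨m', hrun, hchar⟩ := ih (m.insert last (m.getD last 1 + 1)) last hpt hfresh'
        refine ⟨m', hrun, fun d => ?_⟩
        rw [hchar d]
        by_cases hd : d = last
        · subst hd
          rw [List.count_cons_self,
              PySem.Dict.getD_insert, if_pos rfl, PySem.Dict.get?_insert, if_pos rfl]
          simp only [true_and]
          split_ifs <;>
            first
              | rfl
              | (exfalso; omega)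
              | (simp only [Option.some.injEq]; push_cast; omega)
        · rw [List.count_cons_of_ne (Ne.symm hd),
              PySem.Dict.getD_insert, if_neg hd, PySem.Dict.get?_insert, if_neg hd]
      · -- fresh group at d0
        have hlt : last < d0 := lt_of_le_of_ne hld heq
        have hbeq : ¬ ((last == d0) = true) := by simpa using heq
        rw [if_neg hbeq]
        have hfresh' : ∀ d : Int, d0 < d → m.get? d = none := fun d hd => hfresh d (lt_trans hlt hd)
        obtain ⟨m', hrun, hchar⟩ := ih m d0 hpt hfresh'
        refine ⟨m', hrun, fun d => ?_⟩
        rw [hchar d]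
        by_cases hd : d = d0
        · subst hd
          have hD : m.getD d 1 = 1 :=
            PySem.Dict.getD_of_get?_eq_none _ _ (hfresh d hlt)
          rw [List.count_cons_self, hD, hfresh d hlt]
          simp only [true_and]
          split_ifs <;>
            first
              | rfl
              | (exfalso; omega)
              | (simp only [Option.some.injEq]; push_cast; omega)
        · rw [List.count_cons_of_ne (Ne.symm hd)]
          by_cases hdl : d = last
          · subst hdl
            have hc0 : List.count d rest = 0 := by
              refine List.count_eq_zero.mpr (fun h => ?_)
              exact absurd (hrest_ge d h) (not_le.mpr hlt)
            rw [hc0]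
            split_ifs <;> first | rfl | (exfalso; omega)
          · split_ifs <;> first | rfl | (exfalso; omega)

-- membership in values ↔ a lookup hit (keys are unique throughout the loop)
theorem pvMem_values_iff (m : PySem.Dict Int Int) (hnd : m.keys.Nodup) (v : Int) :
    v ∈ m.values ↔ ∃ k : Int, m.get? k = some v := by
  constructor
  · intro hv
    simp only [PySem.Dict.values, List.mem_map] at hv
    obtain ⟨⟨k, w⟩, hkv, hw⟩ := hv
    cases hw
    exact ⟨k, PySem.Dict.get?_of_mem_items _ hkv hnd⟩
  · rintro ⟨k, hk⟩
    have := PySem.Dict.mem_items_of_get?_eq_some _ hk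
    simp only [PySem.Dict.values, List.mem_map]
    exact ⟨(k, v), this, rfl⟩

-- the sorted case, combined: A's dict pass says "some value is 2" iff some digit occurs exactly twice
theorem pvSortedCase (ds : List Int) (h0 : ∀ d ∈ ds, 0 ≤ d)
    (hp : List.Pairwise (· ≤ ·) ds) :
    ∃ m', loopInts ds PySem.Dict.empty (-1) = some m' ∧
      (m'.values.any (fun v => v == 2) = ds.any (fun d => PySem.List.count ds d == 2)) := by
  have hp' : List.Pairwise (· ≤ ·) ((-1 : Int) :: ds) :=
    List.Pairwise.cons (fun x hx => le_trans (by norm_num) (h0 x hx)) hp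
  have hfresh : ∀ d : Int, (-1 : Int) < d → (PySem.Dict.empty : PySem.Dict Int Int).get? d = none :=
    fun d _ => PySem.Dict.get?_empty d
  obtain ⟨m', hrun, hchar⟩ := loopInts_char ds PySem.Dict.empty (-1) hp' hfresh
  refine ⟨m', hrun, ?_⟩
  have hnd : m'.keys.Nodup :=
    loopInts_nodup ds PySem.Dict.empty (-1) m' hrun PySem.Dict.nodup_keys_empty
  rw [Bool.eq_iff_iff]
  simp only [List.any_eq_true, beq_iff_eq, PySem.List.count_eq]
  constructor
  · rintro ⟨v, hv, rfl⟩
    obtain ⟨k, hk⟩ := (pvMem_values_iff m' hnd _).mp hv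
    rw [hchar k] at hk
    split_ifs at hk with h1 h2
    · -- a run continuing from the phantom last = -1 is impossible: digits are ≥ 0
      exfalso
      obtain ⟨rfl, hk2⟩ := h1
      have := h0 _ (List.count_pos_iff.mp (show 0 < List.count (-1 : Int) ds by omega))
      omega
    · have hcnt : List.count k ds = 2 := by
        have := Option.some.inj hk
        omega
      exact ⟨k, List.count_pos_iff.mp (by omega), hcnt⟩
    · rw [PySem.Dict.get?_empty] at hk
      cases hk
  · rintro ⟨d, hd, hc⟩
    have hdn : (0 : Int) ≤ d := h0 d hd
    have hget : m'.get? d = some 2 := by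
      rw [hchar d]
      rw [if_neg (by rintro ⟨h, -⟩; omega), if_pos (by omega), hc]
      rfl
    exact ⟨2, (pvMem_values_iff m' hnd 2).mpr ⟨d, hget⟩, rfl⟩

-- B's guard is exactly sortedness
theorem pvSortedIff (ds : List Int) :
    ds = PySem.List.sorted ds (fun x => x) ↔ List.Pairwise (· ≤ ·) ds := by
  constructor
  · intro h
    have := PySem.List.sorted_pairwise ds (fun x => x)
    rw [← h] at this
    simpa using this
  · intro h
    exact (PySem.List.sorted_eq_self_of_pairwise ds (fun x => x) (by simpa using h)).symm

-- ===== VERDICT (by name: the statement is the Claim_ definition above) =====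
theorem meets_critera_spec : Claim_equal_meets_critera := by
  intro n _ _
  unfold Spec_meets_critera
  simp only [meets_critera, meets_critera_alt]
  by_cases hlen : (PySem.Int.toChars n).length ≠ 6
  · rw [if_pos hlen, if_pos hlen]
  · rw [if_neg hlen, if_neg hlen]
    have h0 : ∀ d ∈ (PySem.Int.toChars n).map pvConv, (0 : Int) ≤ d := by
      intro d hd
      obtain ⟨c, -, rfl⟩ := List.mem_map.mp hd
      exact pvConv_nonneg c
    rw [meetsLoopA_eq_loopInts]
    by_cases hp : List.Pairwise (· ≤ ·) ((PySem.Int.toChars n).map pvConv)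
    · obtain ⟨m', hrun, hval⟩ := pvSortedCase _ h0 hp
      rw [hrun, if_neg (by simpa using (pvSortedIff _).mpr hp)]
      exact hval
    · rw [loopInts_none _ PySem.Dict.empty (-1)
          (fun hpp => hp (List.Pairwise.of_cons hpp))]
      rw [if_pos (fun h => hp ((pvSortedIff _).mp h))]
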